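-- pv_equiv track=rewrite | github.com/aclima93/MAS | Assignment01/shortest_path.py | edge_pair_coverage
-- ===== SOURCE A (Python) =====
-- def edge_pair_coverage(edges, path):
--     counter = 0
--
--     for i in range(len(path) - 2):
--         left_edge = [path[i], path[i + 1]]
--         right_edge = [path[i + 1], path[i + 2]]
--         if (left_edge in edges) and (right_edge in edges):
--             counter += 1
--
--     return counter
-- ===== SOURCE B (Python) =====
-- def edge_pair_coverage(edges, path):
--     present = [[path[i], path[i + 1]] in edges for i in range(len(path) - 1)]
--     counter = 0
--     for i in range(len(present) - 1):
--         if present[i] and present[i + 1]: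
--             counter += 1
--     return counter
-- ===== Notes on version B (the rewrite author's own statement) =====
-- stated objective: alternative
-- what changed: B first builds a boolean list present[i] = ([path[i],path[i+1]] in edges) in one pass, then counts adjacent true-pairs in a second pass, so each edge's membership is tested once instead of twice per step.
import Mathlib
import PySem

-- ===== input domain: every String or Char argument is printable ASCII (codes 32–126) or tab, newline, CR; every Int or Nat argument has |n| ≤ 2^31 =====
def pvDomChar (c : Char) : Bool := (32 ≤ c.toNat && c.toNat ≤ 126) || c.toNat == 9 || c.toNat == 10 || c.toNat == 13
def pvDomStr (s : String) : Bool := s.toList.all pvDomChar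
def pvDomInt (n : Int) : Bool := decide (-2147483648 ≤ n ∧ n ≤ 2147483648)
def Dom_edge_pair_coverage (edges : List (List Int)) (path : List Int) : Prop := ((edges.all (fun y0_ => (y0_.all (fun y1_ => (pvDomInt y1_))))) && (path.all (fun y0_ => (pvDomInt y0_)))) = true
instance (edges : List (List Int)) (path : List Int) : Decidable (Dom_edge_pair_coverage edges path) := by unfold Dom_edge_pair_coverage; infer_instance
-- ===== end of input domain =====

-- B builds the edge-presence booleans in one pass, then counts adjacent present-pairs in a second pass; same return value as A.
-- ===== PORT A =====
def edge_pair_coverage (edges : List (List Int)) (path : List Int) : Int :=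
  (PySem.List.pyRange 0 ((path.length : Int) - 2) 1).foldl
    (fun counter i =>
      let left_edge := [PySem.List.pyGetD path i 0, PySem.List.pyGetD path (i + 1) 0]
      let right_edge := [PySem.List.pyGetD path (i + 1) 0, PySem.List.pyGetD path (i + 2) 0]
      if left_edge ∈ edges ∧ right_edge ∈ edges then counter + 1 else counter)
    0

-- ===== PORT B =====
def edge_pair_coverage_alt (edges : List (List Int)) (path : List Int) : Int :=
  let present := (PySem.List.pyRange 0 ((path.length : Int) - 1) 1).map
    (fun i => decide ([PySem.List.pyGetD path i 0, PySem.List.pyGetD path (i + 1) 0] ∈ edges))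
  (PySem.List.pyRange 0 ((present.length : Int) - 1) 1).foldl
    (fun counter i =>
      if PySem.List.pyGetD present i false && PySem.List.pyGetD present (i + 1) false
      then counter + 1 else counter)
    0

-- ===== PRECONDITION & SPEC =====
def Spec_edge_pair_coverage (edges : List (List Int)) (path : List Int) (out : Int) : Prop := out = edge_pair_coverage_alt edges path
instance (edges : List (List Int)) (path : List Int) (out : Int) : Decidable (Spec_edge_pair_coverage edges path out) := by unfold Spec_edge_pair_coverage; infer_instance

-- ===== CLAIM =====
def Claim_equal_edge_pair_coverage : Prop := ∀ (edges : List (List Int)) (path : List Int), Dom_edge_pair_coverage edges path → Spec_edge_pair_coverage edges path (edge_pair_coverage edges path)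

-- ===== LEMMAS AND PROOFS =====

theorem edge_pair_coverage_eq (edges : List (List Int)) (path : List Int) :
    edge_pair_coverage edges path = edge_pair_coverage_alt edges path := by
  unfold edge_pair_coverage edge_pair_coverage_alt
  simp only [List.length_map, PySem.List.length_pyRange_one, sub_zero]
  by_cases h : 2 ≤ path.length
  · have hb : ((((path.length : Int) - 1).toNat : Int) - 1) = (path.length : Int) - 2 := by omega
    rw [hb]
    apply PySem.List.foldl_congr_mem
    intro counter i hi
    rw [PySem.List.mem_pyRange_one] at hi
    rw [PySem.List.pyGetD_map_pyRange_of_nonneg _ _ _ _ hi.1 (by omega),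
        PySem.List.pyGetD_map_pyRange_of_nonneg _ _ _ _ (by omega) (by omega)]
    have h2 : i + 1 + 1 = i + 2 := by ring
    rw [h2]
    simp
  · rw [PySem.List.pyRange_one_eq_nil (show (path.length : Int) - 2 ≤ 0 by omega),
        PySem.List.pyRange_one_eq_nil (show ((((path.length : Int) - 1).toNat : Int) - 1) ≤ 0 by omega)]
    rfl

-- ===== VERDICT =====
theorem edge_pair_coverage_spec : Claim_equal_edge_pair_coverage :=
  fun edges path _ => edge_pair_coverage_eq edges path
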